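-- pv_equiv track=rewrite | github.com/zenium/playground | python/aoc2019/day4.py | day4
-- ===== SOURCE A (Python) =====
-- def day4(n):
--     number_str = str(n)
--     if len(number_str) != 6:
--         return False
--     has_double = False
--     last = 0
--     last_largest = 0
--     for s in number_str:
--         i = int(s)
--         if i < last_largest:
--             return False
--         if i == last:
--             has_double = True
--         last = i
--         last_largest = max(last_largest, i)
--     if not has_double:
--         return False
--     return True
-- ===== SOURCE B (Python) =====
-- def day4(n):
--     s = str(n)
--     if len(s) != 6:
--         return False
--     non_dec = list(s) == sorted(s)
--     has_pair = any(a == b for a, b in zip(s, s[1:]))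
--     return non_dec and has_pair
-- ===== Notes on version B (the rewrite author's own statement) =====
-- stated objective: idiomatic
-- what changed: Replaces the fused single-pass running-max/last-digit loop with two independent declarative checks: a sort-and-compare for non-decreasing digits and a pairwise zip scan for an adjacent double.
-- outside the precondition, e.g. on day4(-99999): A raises ValueError, B returns True; on day4(-10000): A raises ValueError, B returns False
import Mathlib
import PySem

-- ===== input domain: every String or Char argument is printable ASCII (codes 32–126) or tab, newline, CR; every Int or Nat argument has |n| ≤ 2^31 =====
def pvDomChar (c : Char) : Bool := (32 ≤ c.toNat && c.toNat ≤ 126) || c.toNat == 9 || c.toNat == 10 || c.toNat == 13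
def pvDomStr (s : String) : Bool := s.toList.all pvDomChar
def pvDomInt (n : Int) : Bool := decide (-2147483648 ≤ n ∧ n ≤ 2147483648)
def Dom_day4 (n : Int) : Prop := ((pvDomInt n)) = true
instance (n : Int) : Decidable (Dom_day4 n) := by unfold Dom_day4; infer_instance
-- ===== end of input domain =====

-- B replaces A's fused running-max/last-digit loop by two independent checks
-- (sorted-compare for non-decreasing, zip scan for an adjacent double); same results, no speed claim.

-- ===== PORT A =====
-- the for-loop of A with its three accumulators (has_double, last, last_largest); early 'return False' = false
def day4Loop : List Char → Bool → Int → Int → Bool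
  | [], hasDouble, _, _ => if !hasDouble then false else true
  | c :: rest, hasDouble, last, lastLargest =>
    match PySem.Int.ofChars? [c] with
    | none => false   -- Python raises ValueError here (int('-')); such inputs are outside Pre_day4
    | some i =>
      if i < lastLargest then false
      else day4Loop rest (hasDouble || (i == last)) i (max lastLargest i)

def day4 (n : Int) : Bool :=
  let number_str := PySem.Int.toChars n
  if number_str.length ≠ 6 then false
  else day4Loop number_str false 0 0

-- ===== PORT B =====
def day4_alt (n : Int) : Bool :=
  let s := PySem.Int.toChars n
  if s.length ≠ 6 then false
  else
    let nonDec := decide (s = PySem.List.sorted s (fun c => c) false)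
    let hasPair := (s.zip (s.drop 1)).any (fun p => p.1 == p.2)
    nonDec && hasPair

-- ===== PRECONDITION & SPEC =====
-- Pre_ excludes exactly the inputs -99999 ≤ n ≤ -10000 (the six-character negatives), on which
-- A raises ValueError at int('-'); A returns normally everywhere else.
def Pre_day4 (n : Int) : Prop := ¬(-99999 ≤ n ∧ n ≤ -10000)
instance (n : Int) : Decidable (Pre_day4 n) := by unfold Pre_day4; infer_instance
def pvWitness_day4 : Int := (122345)
def Spec_day4 (n : Int) (out : Bool) : Prop := out = day4_alt n
instance (n : Int) (out : Bool) : Decidable (Spec_day4 n out) := by unfold Spec_day4; infer_instance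

-- ===== CLAIM (what is proved, stated in full; the proofs are below) =====
def Claim_equal_day4 : Prop := ∀ (n : Int), Dom_day4 n → Pre_day4 n → Spec_day4 n (day4 n)

-- ===== LEMMAS AND PROOFS =====

-- digit value of a char, as A's int(s) computes it on digit chars
def pvVal (c : Char) : Int := (c.toNat : Int) - 48

theorem pvCharEq {c d : Char} (h : c.toNat = d.toNat) : c = d :=
  Char.ext (UInt32.toNat_inj.mp h)

theorem pvDigitCases (c : Char) (h : c.isDigit = true) :
    c = '0' ∨ c = '1' ∨ c = '2' ∨ c = '3' ∨ c = '4' ∨ c = '5' ∨ c = '6' ∨ c = '7' ∨ c = '8' ∨ c = '9' := by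
  simp [Char.isDigit] at h
  obtain ⟨h1, h2⟩ := h
  have h2' : c.toNat ≤ 57 := h2
  have h1' : 48 ≤ c.toNat := h1
  interval_cases hc : c.toNat
  · exact Or.inl (pvCharEq (d := '0') (by rw [hc]; decide))
  · exact Or.inr (Or.inl (pvCharEq (d := '1') (by rw [hc]; decide)))
  · exact Or.inr (Or.inr (Or.inl (pvCharEq (d := '2') (by rw [hc]; decide))))
  · exact Or.inr (Or.inr (Or.inr (Or.inl (pvCharEq (d := '3') (by rw [hc]; decide)))))
  · exact Or.inr (Or.inr (Or.inr (Or.inr (Or.inl (pvCharEq (d := '4') (by rw [hc]; decide))))))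
  · exact Or.inr (Or.inr (Or.inr (Or.inr (Or.inr (Or.inl (pvCharEq (d := '5') (by rw [hc]; decide)))))))
  · exact Or.inr (Or.inr (Or.inr (Or.inr (Or.inr (Or.inr (Or.inl (pvCharEq (d := '6') (by rw [hc]; decide))))))))
  · exact Or.inr (Or.inr (Or.inr (Or.inr (Or.inr (Or.inr (Or.inr (Or.inl (pvCharEq (d := '7') (by rw [hc]; decide)))))))))
  · exact Or.inr (Or.inr (Or.inr (Or.inr (Or.inr (Or.inr (Or.inr (Or.inr (Or.inl (pvCharEq (d := '8') (by rw [hc]; decide))))))))))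
  · exact Or.inr (Or.inr (Or.inr (Or.inr (Or.inr (Or.inr (Or.inr (Or.inr (Or.inr (pvCharEq (d := '9') (by rw [hc]; decide))))))))))

theorem pvOfCharsDigit (c : Char) (h : c.isDigit = true) :
    PySem.Int.ofChars? [c] = some (pvVal c) := by
  rcases pvDigitCases c h with h|h|h|h|h|h|h|h|h|h <;> subst h <;> decide

theorem pvVal_le_iff (c d : Char) : pvVal c ≤ pvVal d ↔ c ≤ d := by
  constructor
  · intro h
    have : c.toNat ≤ d.toNat := by unfold pvVal at h; omega
    exact UInt32.le_iff_toNat_le.mpr this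
  · intro h
    have : c.toNat ≤ d.toNat := UInt32.le_iff_toNat_le.mp h
    unfold pvVal; omega

theorem pvVal_beq (c d : Char) : (pvVal c == pvVal d) = (c == d) := by
  by_cases h : c = d
  · subst h; simp
  · have hne : pvVal c ≠ pvVal d := by
      intro he
      exact h (pvCharEq (by unfold pvVal at he; omega))
    simp [h, hne]

-- every char produced by Nat.toDigitsCore is a digit or comes from the accumulator
theorem pvMemToDigitsCore (f : Nat) : ∀ (n : Nat) (l : List Char) (c : Char),
    c ∈ Nat.toDigitsCore 10 f n l → c ∈ l ∨ c.isDigit = true := by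
  induction f with
  | zero => intro n l c hc; exact Or.inl hc
  | succ f ih =>
    intro n l c hc
    have hdig : (Nat.digitChar (n % 10)).isDigit = true := by
      have : n % 10 < 10 := Nat.mod_lt _ (by norm_num)
      interval_cases h : n % 10 <;> decide
    by_cases hz : n / 10 = 0
    · simp only [Nat.toDigitsCore, hz, if_pos] at hc
      rcases List.mem_cons.mp hc with h | h
      · exact Or.inr (h ▸ hdig)
      · exact Or.inl h
    · simp only [Nat.toDigitsCore, hz, reduceIte] at hc
      rcases ih (n / 10) (Nat.digitChar (n % 10) :: l) c hc with h | h
      · rcases List.mem_cons.mp h with h' | h'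
        · exact Or.inr (h' ▸ hdig)
        · exact Or.inl h'
      · exact Or.inr h

-- head of the digit string of a positive number is a nonzero digit
theorem pvHeadToDigitsCore (f : Nat) : ∀ (n : Nat) (l : List Char),
    0 < n → n < 10 ^ f →
    ∃ c t, Nat.toDigitsCore 10 f n l = c :: t ∧ 49 ≤ c.toNat ∧ c.toNat ≤ 57 := by
  induction f with
  | zero => intro n l h1 h2; omega
  | succ f ih =>
    intro n l h1 h2
    unfold Nat.toDigitsCore
    by_cases hz : n / 10 = 0
    · have h9 : n ≤ 9 := by omega
      have hmod : n % 10 = n := Nat.mod_eq_of_lt (by omega)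
      refine ⟨Nat.digitChar n, l, by simp [hz, hmod], ?_⟩
      interval_cases n <;> decide
    · simp only [hz, reduceIte]
      exact ih (n / 10) _ (by omega) (by rw [pow_succ] at h2; omega)

-- lower bound on the length of toDigitsCore output
theorem pvLenToDigitsCore (f : Nat) : ∀ (n e : Nat) (l : List Char),
    10 ^ e ≤ n → n < 10 ^ f →
    e + 1 + l.length ≤ (Nat.toDigitsCore 10 f n l).length := by
  induction f with
  | zero =>
    intro n e l h1 h2
    have : 1 ≤ 10 ^ e := Nat.one_le_pow _ _ (by norm_num)
    omega
  | succ f ih =>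
    intro n e l h1 h2
    unfold Nat.toDigitsCore
    by_cases hz : n / 10 = 0
    · have h9 : n ≤ 9 := by omega
      have he : e = 0 := by
        by_contra h
        have : 10 ^ 1 ≤ 10 ^ e := Nat.pow_le_pow_right (by norm_num) (by omega)
        simp at this; omega
      simp [hz, he]; omega
    · simp only [hz, reduceIte]
      rcases Nat.eq_zero_or_pos e with he | he
      · have := ih (n / 10) 0 (Nat.digitChar (n % 10) :: l) (by omega)
          (by rw [pow_succ] at h2; omega)
        simp at this ⊢; omega
      · have hle : 10 ^ (e - 1) ≤ n / 10 := by
          have : 10 ^ (e - 1) * 10 ≤ n := by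
            have : 10 ^ (e - 1) * 10 = 10 ^ e := by
              rw [← pow_succ]; congr 1; omega
            omega
          omega
        have := ih (n / 10) (e - 1) (Nat.digitChar (n % 10) :: l) hle
          (by rw [pow_succ] at h2; omega)
        simp at this ⊢; omega

theorem pvFuel (n : Nat) : n < 10 ^ (n + 1) :=
  lt_of_lt_of_le (Nat.lt_pow_self (by norm_num)) (Nat.pow_le_pow_right (by norm_num) (by omega))

-- A's loop computed as "chain non-decreasing" AND "has an adjacent double", on digit strings
theorem pvLoopEq (s : List Char) : ∀ (hd : Bool) (last ll : Int),
    (∀ c ∈ s, c.isDigit = true) →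
    day4Loop s hd last ll =
      (decide (List.IsChain (· ≤ ·) (ll :: s.map pvVal)) &&
       (hd || (((last :: s.map pvVal).zip (s.map pvVal)).any (fun p => p.1 == p.2)))) := by
  induction s with
  | nil =>
    intro hd last ll _
    cases hd <;> simp [day4Loop]
  | cons c cs ih =>
    intro hd last ll hdig
    have hc : c.isDigit = true := hdig c (List.mem_cons_self)
    have hcs : ∀ x ∈ cs, x.isDigit = true := fun x hx => hdig x (List.mem_cons_of_mem _ hx)
    simp only [day4Loop, pvOfCharsDigit c hc]
    by_cases hlt : pvVal c < ll
    · rw [if_pos hlt]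
      have hnc : ¬ List.IsChain (· ≤ ·) (ll :: pvVal c :: cs.map pvVal) := by
        rw [List.isChain_cons_cons]
        intro h
        omega
      simp [hnc]
    · have hle : ll ≤ pvVal c := not_lt.mp hlt
      rw [if_neg hlt, max_eq_right hle, ih _ _ _ hcs]
      have hch : decide (List.IsChain (· ≤ ·) (ll :: pvVal c :: cs.map pvVal))
          = decide (List.IsChain (· ≤ ·) (pvVal c :: cs.map pvVal)) := by
        apply decide_eq_decide.mpr
        rw [List.isChain_cons_cons]
        exact ⟨fun h => h.2, fun h => ⟨hle, h⟩⟩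
      simp only [List.map_cons, List.zip_cons_cons, List.any_cons]
      rw [show (pvVal c == last) = (last == pvVal c) from Bool.beq_comm, Bool.or_assoc]
      congr 1
      exact hch.symm

-- B's sorted-compare is the non-decreasing chain
theorem pvSortedIff (s : List Char) :
    (s = PySem.List.sorted s (fun c => c) false) ↔ List.IsChain (· ≤ ·) s := by
  constructor
  · intro h
    rw [List.isChain_iff_pairwise (R := (· ≤ ·)), h]
    simpa using PySem.List.sorted_pairwise s (fun c => c)
  · intro h
    refine (PySem.List.eq_of_perm_of_pairwise_le_of_injective (fun c => c)
      (fun a b hab => hab) (PySem.List.sorted_perm s (fun c => c) false) ?_ ?_).symm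
    · exact PySem.List.sorted_pairwise s (fun c => c)
    · simpa using List.isChain_iff_pairwise.mp h

-- chain over values = chain over chars
theorem pvChainMap (s : List Char) :
    List.IsChain (· ≤ ·) (s.map pvVal) ↔ List.IsChain (· ≤ ·) s := by
  rw [List.isChain_map]
  constructor
  · intro h
    exact h.imp (by intro a b hab; exact (pvVal_le_iff _ _).mp hab)
  · intro h
    exact h.imp (by intro a b hab; exact (pvVal_le_iff _ _).mpr hab)

-- adjacent-double scan over values = over chars
theorem pvPairMap (s : List Char) :
    ((s.map pvVal).zip ((s.map pvVal).drop 1)).any (fun p => p.1 == p.2)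
      = (s.zip (s.drop 1)).any (fun p => p.1 == p.2) := by
  rw [← List.map_drop, List.zip_map, List.any_map]
  refine PySem.List.any_congr_mem (fun p _ => ?_)
  cases p with
  | mk a b =>
    simpa only [Function.comp_apply, Prod.map_apply] using pvVal_beq a b

-- ===== VERDICT (by name: the statement is the Claim_ definition above) =====
theorem day4_spec : Claim_equal_day4 := by
  intro n _ hPre
  unfold Spec_day4 day4 day4_alt
  by_cases hlen : (PySem.Int.toChars n).length = 6
  · simp only [hlen]
    norm_num
    -- A's loop is only reached on non-negative n: a negative n with a 6-char str is outside Pre_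
    by_cases hneg : n < 0
    · exfalso
      have htc : PySem.Int.toChars n = '-' :: Nat.toDigits 10 n.natAbs := by
        simp [PySem.Int.toChars, hneg]
      rw [htc] at hlen
      simp at hlen
      -- length of digits = 5 forces 10^4 ≤ |n| < 10^5
      have hub : n.natAbs < 100000 := by
        by_contra h
        have := pvLenToDigitsCore (n.natAbs + 1) n.natAbs 5 [] (by norm_num; omega)
          (pvFuel n.natAbs)
        unfold Nat.toDigits at hlen
        simp [hlen] at this
      have hlb : 10000 ≤ n.natAbs := by
        by_contra h
        have := Nat.toDigits_length 10 n.natAbs 4 (by norm_num) (by norm_num; omega)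
        omega
      exact hPre ⟨by omega, by omega⟩
    · rw [not_lt] at hneg
      have htc : PySem.Int.toChars n = Nat.toDigits 10 n.toNat := by
        simp [PySem.Int.toChars, not_lt.mpr hneg]
      have hpos : 0 < n.toNat := by
        rcases Nat.eq_zero_or_pos n.toNat with h0 | h0
        · exfalso; rw [htc, h0] at hlen; simp [Nat.toDigits, Nat.toDigitsCore] at hlen
        · exact h0
      obtain ⟨c, t, hct, hc49, hc57⟩ :=
        pvHeadToDigitsCore (n.toNat + 1) n.toNat [] hpos (pvFuel n.toNat)
      have hdig : ∀ x ∈ PySem.Int.toChars n, x.isDigit = true := by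
        intro x hx
        rw [htc] at hx
        rcases pvMemToDigitsCore (n.toNat + 1) n.toNat [] x hx with h | h
        · simp at h
        · exact h
      rw [pvLoopEq _ false 0 0 hdig]
      have hshape : PySem.Int.toChars n = c :: t := by rw [htc]; exact hct
      have hcdig : c.isDigit = true := hdig c (by rw [hshape]; exact List.mem_cons_self)
      -- head value is ≥ 1, so the initial last = 0 and last_largest = 0 are inert
      have hv1 : 1 ≤ pvVal c := by unfold pvVal; omega
      rw [hshape]
      have hch0 : decide (List.IsChain (· ≤ ·) ((0 : Int) :: pvVal c :: t.map pvVal))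
          = decide (List.IsChain (· ≤ ·) (pvVal c :: t.map pvVal)) := by
        apply decide_eq_decide.mpr
        rw [List.isChain_cons_cons]
        exact ⟨fun h => h.2, fun h => ⟨by omega, h⟩⟩
      have h0ne : ((0 : Int) == pvVal c) = false := by simp; omega
      simp only [List.map_cons, List.zip_cons_cons, List.any_cons, h0ne,
        Bool.false_or]
      -- both sides are now "chain && adjacent-double" over the same list c :: t
      have hchain := pvChainMap (c :: t)
      have hpair := pvPairMap (c :: t)
      simp only [List.map_cons, List.drop_succ_cons, List.drop_zero] at hchain hpair
      have hdec : decide (List.IsChain (· ≤ ·) (pvVal c :: t.map pvVal))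
          = decide (c :: t = PySem.List.sorted (c :: t) (fun c => c) false) := by
        apply decide_eq_decide.mpr
        rw [pvSortedIff (c :: t)]
        exact hchain
      simp only [List.tail_cons]
      rw [← hdec, ← hpair]
      congr 1
  · simp [hlen]
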